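-- pv_equiv track=rewrite | github.com/ValentineDz/Emploi-Du-Temps-TER | Projet/page_contraintes.py | contraintes_identiques
-- ===== SOURCE A (Python) =====
-- def contraintes_identiques(ref_cfg, other_cfg, default_color="Disponible"):
--     """
--     Vérifie si deux configurations de contraintes sont identiques.
--
--     Compare deux dictionnaires représentant des contraintes (par cellule horaire),
--     en considérant que les cases absentes sont égales à une couleur par défaut
--     (généralement "Disponible").
--
--     Args:
--         ref_cfg (dict): Dictionnaire de contraintes de référence.
--         other_cfg (dict): Dictionnaire de contraintes à comparer.
--         default_color (str, optional): Couleur utilisée par défaut pour les cases absentes.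
--             Par défaut "Disponible".
--
--     Returns:
--         bool: True si les deux configurations sont identiques pour toutes les cases
--         (mêmes valeurs ou valeurs par défaut), False sinon.
--     """
--     ref_cfg = ref_cfg or {}
--     other_cfg = other_cfg or {}
--
--     # Set de toutes les clés utilisées
--     all_keys = set(ref_cfg.keys()) | set(other_cfg.keys())
--     for key in all_keys:
--         if ref_cfg.get(key, default_color) != other_cfg.get(key, default_color):
--             return False
--     return True
-- ===== SOURCE B (Python) =====
-- def contraintes_identiques(ref_cfg, other_cfg, default_color="Disponible"):
--     def canon(cfg):
--         cfg = cfg or {}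
--         return sorted(((k, v) for k, v in cfg.items() if v != default_color),
--                       key=lambda p: p[0])
--     return canon(ref_cfg) == canon(other_cfg)
-- ===== Notes on version B (the rewrite author's own statement) =====
-- stated objective: alternative
-- what changed: Instead of looping over the union of both key sets and comparing per-key .get(key, default) lookups, B canonicalizes each dict into a key-sorted list of its non-default entries and compares the two canonical lists for equality.
import Mathlib
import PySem

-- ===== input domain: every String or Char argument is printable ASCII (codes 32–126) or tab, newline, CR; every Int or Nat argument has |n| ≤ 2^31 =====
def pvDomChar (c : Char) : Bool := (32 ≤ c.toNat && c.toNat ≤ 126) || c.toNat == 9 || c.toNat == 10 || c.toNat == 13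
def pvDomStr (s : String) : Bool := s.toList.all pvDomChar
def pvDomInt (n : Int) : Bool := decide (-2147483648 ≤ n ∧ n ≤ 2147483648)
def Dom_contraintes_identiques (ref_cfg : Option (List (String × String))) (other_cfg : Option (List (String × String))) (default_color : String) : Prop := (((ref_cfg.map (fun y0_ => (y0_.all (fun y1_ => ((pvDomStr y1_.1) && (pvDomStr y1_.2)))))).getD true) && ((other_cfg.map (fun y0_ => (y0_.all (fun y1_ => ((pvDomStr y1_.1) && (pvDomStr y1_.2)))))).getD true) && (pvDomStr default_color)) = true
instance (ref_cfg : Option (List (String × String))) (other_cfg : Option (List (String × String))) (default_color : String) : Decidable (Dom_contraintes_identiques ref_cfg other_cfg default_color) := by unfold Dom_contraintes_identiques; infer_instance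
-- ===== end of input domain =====

-- B replaces A's union-of-keys loop with per-key .get lookups by canonicalization:
-- each dict becomes the key-sorted list of its non-default entries, and the two
-- canonical lists are compared for equality (objective: alternative).

-- ===== PORT A =====
-- dict.get(key, default) on an association list (first match wins)
def pvGetD (l : List (String × String)) (k dflt : String) : String :=
  match l.find? (fun p => p.1 == k) with
  | some p => p.2
  | none => dflt

def contraintes_identiques (ref_cfg : Option (List (String × String))) (other_cfg : Option (List (String × String))) (default_color : String) : Bool :=
  let r := ref_cfg.getD []          -- ref_cfg = ref_cfg or {}
  let o := other_cfg.getD []        -- other_cfg = other_cfg or {}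
  -- all_keys = set(ref_cfg.keys()) | set(other_cfg.keys())
  let allKeys := PySem.Set.union (PySem.Set.ofList (r.map Prod.fst)) (PySem.Set.ofList (o.map Prod.fst))
  -- for key in all_keys: if …get(key, default) != …get(key, default): return False / return True
  -- (iteration order over the set cannot affect this conjunction)
  allKeys.all (fun k => pvGetD r k default_color == pvGetD o k default_color)

-- ===== PORT B =====
-- canon(cfg): key-sorted list of the non-default entries of cfg (cfg = cfg or {})
def pvCanon (cfg : Option (List (String × String))) (dc : String) : List (String × String) :=
  PySem.List.sorted ((cfg.getD []).filter (fun p => !(p.2 == dc))) (fun p => p.1) false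

def contraintes_identiques_alt (ref_cfg : Option (List (String × String))) (other_cfg : Option (List (String × String))) (default_color : String) : Bool :=
  pvCanon ref_cfg default_color == pvCanon other_cfg default_color

-- ===== PRECONDITION & SPEC =====
-- Pre_ excludes association lists with duplicate keys: they do not represent any Python dict
-- (the Python function only ever receives genuine dicts, whose keys are unique).
def Pre_contraintes_identiques (ref_cfg : Option (List (String × String))) (other_cfg : Option (List (String × String))) (default_color : String) : Prop :=
  ((ref_cfg.getD []).map Prod.fst).Nodup ∧ ((other_cfg.getD []).map Prod.fst).Nodup
instance (ref_cfg : Option (List (String × String))) (other_cfg : Option (List (String × String))) (default_color : String) : Decidable (Pre_contraintes_identiques ref_cfg other_cfg default_color) := by unfold Pre_contraintes_identiques; infer_instance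
def pvWitness_contraintes_identiques : (Option (List (String × String))) × (Option (List (String × String))) × String :=
  (some [("L1", "Rouge"), ("L2", "Disponible")], none, "Disponible")
def Spec_contraintes_identiques (ref_cfg : Option (List (String × String))) (other_cfg : Option (List (String × String))) (default_color : String) (out : Bool) : Prop := out = contraintes_identiques_alt ref_cfg other_cfg default_color
instance (ref_cfg : Option (List (String × String))) (other_cfg : Option (List (String × String))) (default_color : String) (out : Bool) : Decidable (Spec_contraintes_identiques ref_cfg other_cfg default_color out) := by unfold Spec_contraintes_identiques; infer_instance

-- ===== CLAIM (what is proved, stated in full; the proofs are below) =====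
def Claim_equal_contraintes_identiques : Prop := ∀ (ref_cfg : Option (List (String × String))) (other_cfg : Option (List (String × String))) (default_color : String), Dom_contraintes_identiques ref_cfg other_cfg default_color → Pre_contraintes_identiques ref_cfg other_cfg default_color → Spec_contraintes_identiques ref_cfg other_cfg default_color (contraintes_identiques ref_cfg other_cfg default_color)

-- ===== LEMMAS AND PROOFS =====

-- the non-default entries of l
def pvNF (l : List (String × String)) (dc : String) : List (String × String) :=
  l.filter (fun p => !(p.2 == dc))

-- key not present ⇒ find? fails
theorem pv_find?_eq_none {l : List (String × String)} {k : String}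
    (h : k ∉ l.map Prod.fst) : l.find? (fun p => p.1 == k) = none := by
  apply List.find?_eq_none.mpr
  intro p hp hbeq
  exact h (List.mem_map.mpr ⟨p, hp, by simpa using hbeq⟩)

-- k absent ⇒ lookup gives the default
theorem pv_getD_not_mem {l : List (String × String)} {k dc : String}
    (h : k ∉ l.map Prod.fst) : pvGetD l k dc = dc := by
  unfold pvGetD
  rw [pv_find?_eq_none h]

-- on a duplicate-free association list, membership = successful find?
theorem pv_mem_iff_find {l : List (String × String)} {k v : String}
    (hn : (l.map Prod.fst).Nodup) :
    (k, v) ∈ l ↔ l.find? (fun p => p.1 == k) = some (k, v) := by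
  induction l with
  | nil => simp
  | cons a t ih =>
    rw [List.map_cons] at hn
    obtain ⟨ha, hn'⟩ := List.nodup_cons.mp hn
    by_cases hk : a.1 = k
    · rw [List.find?_cons_of_pos (by simpa using hk)]
      constructor
      · intro hm
        rcases List.mem_cons.mp hm with h1 | h2
        · exact congrArg some h1.symm
        · exact absurd (List.mem_map.mpr ⟨(k, v), h2, rfl⟩) (hk ▸ ha)
      · intro hf
        exact List.mem_cons.mpr (Or.inl (Option.some.inj hf).symm)
    · rw [List.find?_cons_of_neg (by simpa using hk)]
      constructor
      · intro hm
        rcases List.mem_cons.mp hm with h1 | h2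
        · exact absurd (show a.1 = k by rw [← h1]) hk
        · exact (ih hn').mp h2
      · intro hf
        exact List.mem_cons.mpr (Or.inr ((ih hn').mpr hf))

-- membership in the non-default entries, characterized by the .get(·, default) value
theorem pv_mem_nf {l : List (String × String)} {k v dc : String}
    (hn : (l.map Prod.fst).Nodup) :
    (k, v) ∈ pvNF l dc ↔ pvGetD l k dc = v ∧ v ≠ dc := by
  unfold pvNF
  rw [List.mem_filter]
  constructor
  · rintro ⟨hm, hv⟩
    have hf := (pv_mem_iff_find hn).mp hm
    exact ⟨by simp [pvGetD, hf], by simpa using hv⟩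
  · rintro ⟨hg, hv⟩
    cases hf : l.find? (fun p => p.1 == k) with
    | none =>
      simp only [pvGetD, hf] at hg
      exact absurd hg.symm hv
    | some p =>
      simp only [pvGetD, hf] at hg
      have hpk : p.1 = k := by simpa using List.find?_some hf
      have hp : p = (k, v) := by cases p; simp_all
      rw [hp] at hf
      exact ⟨(pv_mem_iff_find hn).mpr hf, by simpa using hv⟩

-- keys of the non-default entries stay duplicate-free, hence so do the pairs
theorem pv_nf_keys_nodup {l : List (String × String)} {dc : String}
    (hn : (l.map Prod.fst).Nodup) : ((pvNF l dc).map Prod.fst).Nodup :=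
  hn.sublist ((List.filter_sublist).map Prod.fst)

theorem pv_nf_nodup {l : List (String × String)} {dc : String}
    (hn : (l.map Prod.fst).Nodup) : (pvNF l dc).Nodup :=
  (pv_nf_keys_nodup hn).of_map

-- agreement of all lookups ↔ the non-default entry lists are permutations
theorem pv_agree_iff_perm {r o : List (String × String)} {dc : String}
    (hr : (r.map Prod.fst).Nodup) (ho : (o.map Prod.fst).Nodup) :
    (∀ k, pvGetD r k dc = pvGetD o k dc) ↔ (pvNF r dc).Perm (pvNF o dc) := by
  constructor
  · intro h
    rw [List.perm_ext_iff_of_nodup (pv_nf_nodup hr) (pv_nf_nodup ho)]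
    rintro ⟨k, v⟩
    rw [pv_mem_nf hr, pv_mem_nf ho, h k]
  · intro hp k
    by_cases hgr : pvGetD r k dc = dc
    · by_cases hgo : pvGetD o k dc = dc
      · rw [hgr, hgo]
      · have := hp.mem_iff.mpr ((pv_mem_nf ho).mpr ⟨rfl, hgo⟩)
        exact absurd ((pv_mem_nf hr).mp this).1 (by rw [hgr]; exact fun e => hgo e.symm)
    · have := hp.mem_iff.mp ((pv_mem_nf hr).mpr ⟨rfl, hgr⟩)
      exact ((pv_mem_nf ho).mp this).1.symm

-- sorting association lists by key: when the first list's keys are duplicate-free,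
-- equality of the key-sorted lists ↔ the lists are permutations of each other
theorem pv_sorted_eq_iff_perm {r o : List (String × String)}
    (hr : (r.map Prod.fst).Nodup) :
    (PySem.List.sorted r (fun p => p.1) false = PySem.List.sorted o (fun p => p.1) false)
      ↔ r.Perm o := by
  constructor
  · intro h
    have p1 := PySem.List.sorted_perm r (fun p => p.1) false
    have p2 := PySem.List.sorted_perm o (fun p => p.1) false
    rw [h] at p1
    exact p1.symm.trans p2
  · intro hp
    have hperm : (PySem.List.sorted r (fun p => p.1) false).Perm o :=
      (PySem.List.sorted_perm r (fun p => p.1) false).trans hp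
    have hle : (PySem.List.sorted r (fun p => p.1) false).Pairwise (fun a b => a.1 ≤ b.1) :=
      PySem.List.sorted_pairwise r (fun p => p.1)
    have hkeysnd : ((PySem.List.sorted r (fun p => p.1) false).map Prod.fst).Nodup :=
      (((PySem.List.sorted_perm r (fun p => p.1) false).map Prod.fst).nodup_iff).mpr hr
    have hne : (PySem.List.sorted r (fun p => p.1) false).Pairwise (fun a b => a.1 ≠ b.1) :=
      List.pairwise_map.mp hkeysnd
    have hlt : (PySem.List.sorted r (fun p => p.1) false).Pairwise (fun a b => a.1 < b.1) :=
      (hle.and hne).imp (fun h => lt_of_le_of_ne h.1 h.2)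
    exact (PySem.List.sorted_eq_of_perm_of_pairwise_lt o _ (fun p => p.1) hperm hlt).symm

-- A = true ↔ the two lookups agree at EVERY key
theorem pvA_iff (r o : List (String × String)) (dc : String) :
    (contraintes_identiques (some r) (some o) dc = true) ↔
      ∀ k, pvGetD r k dc = pvGetD o k dc := by
  unfold contraintes_identiques
  simp only [Option.getD_some, List.all_eq_true, beq_iff_eq]
  constructor
  · intro h k
    by_cases hk : k ∈ PySem.Set.union (PySem.Set.ofList (r.map Prod.fst)) (PySem.Set.ofList (o.map Prod.fst))
    · exact h k hk
    · rw [PySem.Set.mem_union] at hk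
      rw [not_or] at hk
      rw [PySem.Set.mem_ofList, PySem.Set.mem_ofList] at hk
      rw [pv_getD_not_mem hk.1, pv_getD_not_mem hk.2]
  · intro h k _; exact h k

-- ===== VERDICT (by name: the statement is the Claim_ definition above) =====
theorem contraintes_identiques_spec : Claim_equal_contraintes_identiques := by
  unfold Claim_equal_contraintes_identiques
  intro ref_cfg other_cfg dc _ hpre
  obtain ⟨hr, ho⟩ := hpre
  unfold Spec_contraintes_identiques
  have hA : contraintes_identiques ref_cfg other_cfg dc
      = contraintes_identiques (some (ref_cfg.getD [])) (some (other_cfg.getD [])) dc := by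
    cases ref_cfg <;> cases other_cfg <;> rfl
  rw [hA, Bool.eq_iff_iff, pvA_iff,
    pv_agree_iff_perm hr ho,
    ← pv_sorted_eq_iff_perm (pv_nf_keys_nodup hr)]
  unfold contraintes_identiques_alt pvCanon pvNF
  simp [beq_iff_eq]
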